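-- pv_equiv track=rewrite | github.com/GongniNDC/D_FAST_all | WMPLSH/Roc_plot.py | generate_pseudo_hashes
-- ===== SOURCE A (Python) =====
-- from itertools import combinations
--
-- def generate_pseudo_hashes(query_hash, r):
--     """
--     Generate all pseudo-hashes that differ from the query hash vector by r bits.
--
--     Parameters:
--     query_hash (list): The original hash vector as a list of bits.
--     r (int): The number of bits to flip in the query hash to generate pseudo-hashes.
--
--     Returns:
--     set: A set of pseudo-hashes differing by r bits.
--     """
--     indices = range(len(query_hash))  # Get the indices of the hash vector
--     pseudo_hashes = set()  # Initialize a set to store unique pseudo-hashes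
--     for positions in combinations(indices, r):  # Generate combinations of indices to flip
--         hash_list = list(query_hash)  # Create a mutable copy of the query hash
--         for pos in positions:
--             hash_list[pos] = 1 if hash_list[pos] == 0 else 0  # Flip the bit at the position
--         pseudo_hashes.add(''.join(map(str, hash_list)))  # Convert list back to string and add to set
--     return pseudo_hashes  # Return the set of pseudo-hashes
-- ===== SOURCE B (Python) =====
-- def generate_pseudo_hashes(query_hash, r):
--     """Recursive DFS over positions building each pseudo-hash string character
--     by character (flip-branch first), instead of materialising combinations
--     and mutating a list copy per combination."""
--     n = len(query_hash)
--     result = set()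
--
--     def dfs(i, remaining, prefix):
--         if i == n:
--             if remaining == 0:
--                 result.add(prefix)
--             return
--         x = query_hash[i]
--         if remaining > 0:
--             dfs(i + 1, remaining - 1, prefix + str(1 if x == 0 else 0))
--         dfs(i + 1, remaining, prefix + str(x))
--
--     dfs(0, r, '')
--     return result
-- ===== Notes on version B (the rewrite author's own statement) =====
-- stated objective: alternative
-- what changed: Replaces the itertools.combinations loop (copy the list, flip the chosen positions, join) by a recursive DFS over positions carrying (index, remaining flips, string prefix), building each output string character by character; flip-branch-first gives the same enumeration order.
import Mathlib
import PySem

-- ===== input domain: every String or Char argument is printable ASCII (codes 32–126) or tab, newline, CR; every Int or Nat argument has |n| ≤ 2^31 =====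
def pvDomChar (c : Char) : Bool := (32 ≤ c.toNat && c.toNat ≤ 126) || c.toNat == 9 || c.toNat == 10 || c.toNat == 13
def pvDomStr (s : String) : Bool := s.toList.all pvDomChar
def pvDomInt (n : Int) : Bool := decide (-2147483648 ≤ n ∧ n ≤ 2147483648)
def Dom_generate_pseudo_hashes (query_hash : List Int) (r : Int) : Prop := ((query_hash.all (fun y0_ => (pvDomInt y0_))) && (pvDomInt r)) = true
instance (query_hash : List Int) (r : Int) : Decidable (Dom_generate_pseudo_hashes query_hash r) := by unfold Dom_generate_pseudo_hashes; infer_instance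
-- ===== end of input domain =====

-- B replaces the combinations+copy+flip+join loop of A by a recursive DFS over positions
-- that builds each output string character by character (alternative decomposition, same cost).
-- Return-value equivalence only; neither version mutates its arguments.

-- ===== PORT A =====
-- A: for positions in combinations(range(len(query_hash)), r): copy, flip each position,
--    ''.join(map(str, ...)), add to the set.  (r.toNat: A raises ValueError for r < 0,
--    which Pre_ excludes, so the port's value there is irrelevant.)
def generate_pseudo_hashes (query_hash : List Int) (r : Int) : List String :=
  let indices : List Int := PySem.List.pyRange 0 (PySem.List.len query_hash) 1
  (PySem.List.combinations indices r.toNat).foldl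
    (fun pseudo_hashes positions =>
      let hash_list := positions.foldl
        (fun l pos => PySem.List.pySetD l pos
          (if PySem.List.pyGetD l pos (0:Int) == 0 then (1:Int) else 0)) query_hash
      PySem.Set.add pseudo_hashes (PySem.Str.join "" (hash_list.map PySem.Int.toStr)))
    PySem.Set.empty

-- ===== PORT B =====
-- B's dfs(i, remaining, prefix): recursion over the remaining suffix of query_hash,
-- flip branch first, then keep branch; add prefix at the end iff remaining == 0.
def pvDfs (xs : List Int) (remaining : Int) (pre : String) (s : PySem.Set String) : PySem.Set String :=
  match xs with
  | [] => if remaining == 0 then s.add pre else s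
  | x :: rest =>
      let s1 := if remaining > 0 then
          pvDfs rest (remaining - 1) (pre ++ PySem.Int.toStr (if x == 0 then 1 else 0)) s
        else s
      pvDfs rest remaining (pre ++ PySem.Int.toStr x) s1

def generate_pseudo_hashes_alt (query_hash : List Int) (r : Int) : List String :=
  pvDfs query_hash r "" PySem.Set.empty

-- ===== PRECONDITION & SPEC =====
-- Pre_ excludes only r < 0, where A raises ValueError (itertools.combinations rejects negative r).
def Pre_generate_pseudo_hashes (query_hash : List Int) (r : Int) : Prop := 0 ≤ r
instance (query_hash : List Int) (r : Int) : Decidable (Pre_generate_pseudo_hashes query_hash r) := by unfold Pre_generate_pseudo_hashes; infer_instance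
def pvWitness_generate_pseudo_hashes : List Int × Int := ([0, 1, 1], 1)

def Spec_generate_pseudo_hashes (query_hash : List Int) (r : Int) (out : List String) : Prop := out = generate_pseudo_hashes_alt query_hash r
instance (query_hash : List Int) (r : Int) (out : List String) : Decidable (Spec_generate_pseudo_hashes query_hash r out) := by unfold Spec_generate_pseudo_hashes; infer_instance

-- ===== CLAIM (what is proved, stated in full; the proofs are below) =====
def Claim_equal_generate_pseudo_hashes : Prop := ∀ (query_hash : List Int) (r : Int), Dom_generate_pseudo_hashes query_hash r → Pre_generate_pseudo_hashes query_hash r → Spec_generate_pseudo_hashes query_hash r (generate_pseudo_hashes query_hash r)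

-- ===== LEMMAS AND PROOFS =====

-- A's inner loop with the Int layer stripped: flip the listed (Nat) positions.
def pvFlips (q : List Int) (ps : List Nat) : List Int :=
  ps.foldl (fun l p => l.set p (if l.getD p 0 == 0 then (1:Int) else 0)) q

-- A's string for one combination.
def pvStrOf (q : List Int) (ps : List Nat) : String :=
  PySem.Str.join "" ((pvFlips q ps).map PySem.Int.toStr)

-- the list of strings B's DFS enumerates for a suffix and a (Nat) flip budget
def pvEnum : List Int → Nat → List String
  | [], 0 => [""]
  | [], _ + 1 => []
  | x :: rest, 0 => (pvEnum rest 0).map (PySem.Int.toStr x ++ ·)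
  | x :: rest, k + 1 =>
      (pvEnum rest k).map (PySem.Int.toStr (if x == 0 then 1 else 0) ++ ·)
        ++ (pvEnum rest (k + 1)).map (PySem.Int.toStr x ++ ·)

theorem pvJoin_empty_cons (a : String) (l : List String) :
    PySem.Str.join "" (a :: l) = a ++ PySem.Str.join "" l := by
  apply String.toList_inj.mp
  cases l with
  | nil => simp [PySem.Str.toList_join, PySem.Chars.join_singleton, PySem.Chars.join_nil]
  | cons b t => simp [PySem.Str.toList_join, PySem.Chars.join_cons_cons]

theorem pvFlips_shift (ps : List Nat) (q : List Int) (x : Int) :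
    pvFlips (x :: q) (ps.map (· + 1)) = x :: pvFlips q ps := by
  induction ps generalizing q with
  | nil => rfl
  | cons p t ih =>
      simp only [List.map_cons, pvFlips, List.foldl_cons, List.getD_cons_succ,
        List.set_cons_succ]
      exact ih (q.set p (if q.getD p 0 == 0 then 1 else 0))

theorem pvStrOf_cons_keep (q : List Int) (x : Int) (ps : List Nat) :
    pvStrOf (x :: q) (ps.map (· + 1)) = PySem.Int.toStr x ++ pvStrOf q ps := by
  simp only [pvStrOf, pvFlips_shift, List.map_cons, pvJoin_empty_cons]

theorem pvStrOf_cons_flip (q : List Int) (x : Int) (ps : List Nat) :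
    pvStrOf (x :: q) (0 :: ps.map (· + 1))
      = PySem.Int.toStr (if x == 0 then 1 else 0) ++ pvStrOf q ps := by
  have h : pvFlips (x :: q) (0 :: ps.map (· + 1))
      = (if x == 0 then (1:Int) else 0) :: pvFlips q ps := by
    simp only [pvFlips, List.foldl_cons, List.getD_cons_zero, List.set_cons_zero]
    exact pvFlips_shift ps q _
  simp only [pvStrOf, h, List.map_cons, pvJoin_empty_cons]

-- A's combination strings, in order, are exactly pvEnum.
theorem pvCombos_eq_enum (q : List Int) (k : Nat) :
    (PySem.List.combinations (List.range q.length) k).map (pvStrOf q) = pvEnum q k := by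
  induction q generalizing k with
  | nil =>
      cases k with
      | zero => simp [PySem.List.combinations_zero, pvEnum]; rfl
      | succ k => simp [PySem.List.combinations_nil_succ, pvEnum]
  | cons x q ih =>
      have hr : List.range (x :: q).length = 0 :: (List.range q.length).map (· + 1) := by
        simpa [Nat.succ_eq_add_one] using (List.range_succ_eq_map (n := q.length))
      cases k with
      | zero =>
          simp only [PySem.List.combinations_zero, pvEnum, ← ih 0,
            List.map_cons, List.map_nil]
          simpa using pvStrOf_cons_keep q x []
      | succ k =>
          rw [hr, PySem.List.combinations_cons_succ, PySem.List.combinations_map,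
            PySem.List.combinations_map]
          simp only [List.map_append, List.map_map, pvEnum, ← ih k, ← ih (k + 1),
            List.map_map]
          congr 1
          · apply List.map_congr_left; intro ps _
            exact pvStrOf_cons_flip q x ps
          · apply List.map_congr_left; intro ps _
            exact pvStrOf_cons_keep q x ps

-- B's DFS folds exactly pvEnum (prefixed) into the set.
theorem pvDfs_eq_foldl (q : List Int) (r : Int) (hr : 0 ≤ r) (pre : String)
    (s : PySem.Set String) :
    pvDfs q r pre s = ((pvEnum q r.toNat).map (pre ++ ·)).foldl PySem.Set.add s := by
  induction q generalizing r pre s with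
  | nil =>
      by_cases h : r = 0
      · subst h; simp [pvDfs, pvEnum]
      · have : r.toNat ≠ 0 := by omega
        obtain ⟨k, hk⟩ := Nat.exists_eq_succ_of_ne_zero this
        simp [pvDfs, h, hk, pvEnum]
  | cons x rest ih =>
      by_cases h : 0 < r
      · have hk : r.toNat = (r - 1).toNat + 1 := by omega
        rw [pvDfs]
        simp only [h, if_pos]
        rw [ih (r - 1) (by omega), ih r hr, hk]
        simp only [pvEnum, List.map_append, List.map_map, List.foldl_append, ← hk]
        congr 1
        · congr 1
          apply List.map_congr_left; intro ps _
          simp [String.append_assoc]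
        · apply List.map_congr_left; intro ps _
          simp [String.append_assoc]
      · have h0 : r = 0 := by omega
        subst h0
        rw [pvDfs]
        simp only [gt_iff_lt, lt_irrefl, if_neg, not_false_iff]
        rw [ih 0 le_rfl]
        simp only [Int.toNat_zero, pvEnum, List.map_map]
        congr 1
        apply List.map_congr_left; intro ps _
        simp [String.append_assoc]

-- the Int index layer of A's inner loop stripped to Nat positions
theorem pvFlips_int (ps : List Nat) (q : List Int) :
    List.foldl
        (fun l pos => PySem.List.pySetD l pos
          (if PySem.List.pyGetD l pos (0:Int) == 0 then (1:Int) else 0))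
        q (ps.map (fun (k : Nat) => (k : Int)))
      = pvFlips q ps := by
  induction ps generalizing q with
  | nil => rfl
  | cons p t ihp =>
      simp only [List.map_cons, List.foldl_cons, pvFlips, PySem.List.pySetD_natCast,
        PySem.List.pyGetD_natCast]
      exact ihp _

-- A rewritten to the same fold of pvEnum.
theorem pvA_eq_foldl (q : List Int) (r : Int) :
    generate_pseudo_hashes q r = (pvEnum q r.toNat).foldl PySem.Set.add PySem.Set.empty := by
  unfold generate_pseudo_hashes
  dsimp only []
  rw [PySem.List.len_eq, PySem.List.pyRange_zero_natCast, PySem.List.combinations_map]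
  rw [← pvCombos_eq_enum q r.toNat]
  rw [← List.foldl_map, ← List.foldl_map, List.map_map]
  congr 1
  rw [List.map_map]
  apply List.map_congr_left; intro ps _
  dsimp only [Function.comp]
  rw [pvFlips_int ps q]
  rfl

-- ===== VERDICT (by name: the statement is the Claim_ definition above) =====
theorem generate_pseudo_hashes_spec : Claim_equal_generate_pseudo_hashes := by
  intro q r _ hpre
  unfold Spec_generate_pseudo_hashes generate_pseudo_hashes_alt
  rw [pvA_eq_foldl, pvDfs_eq_foldl q r hpre "" PySem.Set.empty]
  congr 1
  simp
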